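-- pv_equiv track=rewrite | github.com/pypi-data/pypi-mirror-397 | packages/anc/anc-0.4.25-py3-none-any.whl/anc/cli/util.py | extract_step_from_path
-- ===== SOURCE A (Python) =====
-- def extract_step_from_path(path: str) -> int:
--     try:
--         if 'step=' in path:
--             tail = path.split('step=')[1]
--             digits = []
--             for ch in tail:
--                 if ch.isdigit():
--                     digits.append(ch)
--                 else:
--                     break
--             return int(''.join(digits)) if digits else 0
--     except Exception:
--         pass
--     return 0
-- ===== SOURCE B (Python) =====
-- def extract_step_from_path(path: str) -> int:
--     _, sep, tail = path.partition('step=')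
--     if not sep:
--         return 0
--     digits = tail[:len(tail) - len(tail.lstrip('0123456789'))]
--     return int(digits) if digits else 0
-- ===== Notes on version B (the rewrite author's own statement) =====
-- stated objective: idiomatic
-- what changed: Replaces the membership test + split + explicit digit-accumulating loop with break + join + try/except by loop-free staged string operations: str.partition to cut at the first 'step=', an lstrip('0123456789') length difference to measure the digit prefix, and one slice fed to int().
import Mathlib
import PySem

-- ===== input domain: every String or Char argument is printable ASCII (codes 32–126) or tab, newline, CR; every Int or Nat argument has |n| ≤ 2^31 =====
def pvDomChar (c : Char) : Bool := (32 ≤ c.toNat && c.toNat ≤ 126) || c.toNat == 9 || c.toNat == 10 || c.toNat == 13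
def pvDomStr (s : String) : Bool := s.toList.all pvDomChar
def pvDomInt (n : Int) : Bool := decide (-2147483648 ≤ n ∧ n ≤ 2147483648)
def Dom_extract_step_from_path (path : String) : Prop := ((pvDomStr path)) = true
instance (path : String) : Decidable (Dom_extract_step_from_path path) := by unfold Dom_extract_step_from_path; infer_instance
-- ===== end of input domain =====

-- B replaces the membership test + split + digit-list loop + try/except by loop-free staged
-- string operations: partition at 'step=', an lstrip('0123456789') length difference, one slice, int() (idiomatic).

-- ===== PORT A =====
-- the constant string 'step=' as a char list
def stepEq : List Char := ['s', 't', 'e', 'p', '=']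

-- the for-ch loop: append digits, break at the first non-digit
def aCollect : List Char → List Char
  | [] => []
  | c :: rest => if PySem.Chars.isdigit c then c :: aCollect rest else []

def extract_step_from_path (path : String) : Int :=
  let s := path.toList
  if PySem.Chars.isIn stepEq s then
    match PySem.List.pyGet? (PySem.Chars.splitOn s stepEq) 1 with
    | none => 0              -- IndexError → except → 0
    | some tail =>
      let digits := aCollect tail
      if digits.isEmpty then 0
      else
        match PySem.Int.ofChars? digits with
        | some v => v
        | none => 0          -- ValueError → except → 0
  else 0

-- ===== PORT B =====
-- str.partition(sub) for nonempty sub: (before, sub, after) at the FIRST occurrence,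
-- (s, '', '') if absent — exact hand port of Python's str.partition
def pyPartition (s sub : List Char) : List Char × List Char × List Char :=
  let i := PySem.Chars.find s sub
  if i < 0 then (s, [], [])
  else (s.take i.toNat, sub, s.drop (i.toNat + sub.length))

def extract_step_from_path_alt (path : String) : Int :=
  let t := pyPartition path.toList stepEq
  if t.2.1.isEmpty then 0
  else
    let tail := t.2.2
    -- tail.lstrip('0123456789'): drop the longest prefix of chars from that set — exact hand port
    let stripped := tail.dropWhile (fun c => ['0','1','2','3','4','5','6','7','8','9'].contains c)
    let digits := PySem.Chars.slice tail none (some ((tail.length - stripped.length : Nat) : Int))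
    if digits.isEmpty then 0
    else (PySem.Int.ofChars? digits).getD 0   -- int(digits); never ValueError here (digits is all digits)

-- ===== PRECONDITION & SPEC =====
def Spec_extract_step_from_path (path : String) (out : Int) : Prop := out = extract_step_from_path_alt path
instance (path : String) (out : Int) : Decidable (Spec_extract_step_from_path path out) := by unfold Spec_extract_step_from_path; infer_instance

-- ===== CLAIM (what is proved, stated in full; the proofs are below) =====
def Claim_equal_extract_step_from_path : Prop := ∀ (path : String), Dom_extract_step_from_path path → Spec_extract_step_from_path path (extract_step_from_path path)

-- ===== LEMMAS AND PROOFS =====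

theorem aCollect_eq_takeWhile (l : List Char) : aCollect l = l.takeWhile PySem.Chars.isdigit := by
  induction l with
  | nil => rfl
  | cons c r ih => by_cases h : PySem.Chars.isdigit c <;> simp [aCollect, h, ih]

-- membership in the literal digit list is exactly isdigit
theorem contains_digit (c : Char) : ['0','1','2','3','4','5','6','7','8','9'].contains c = PySem.Chars.isdigit c := by
  have h09 : PySem.Chars.isdigit c = (decide (48 ≤ c.toNat) && decide (c.toNat ≤ 57)) := by
    simp only [PySem.Chars.isdigit, Char.le_def, UInt32.le_iff_toNat_le]; rfl
  have hmem : ∀ d : Char, (c == d) = decide (c.toNat = d.toNat) := by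
    intro d
    rw [Bool.eq_iff_iff]
    simp only [beq_iff_eq, decide_eq_true_eq]
    exact ⟨fun h => by rw [h], fun h => Char.ofNat_toNat c ▸ Char.ofNat_toNat d ▸ by rw [h]⟩
  simp only [List.contains_cons, List.contains_nil, Bool.or_false, h09, hmem]
  have e0 : '0'.toNat = 48 := rfl
  have e1 : '1'.toNat = 49 := rfl
  have e2 : '2'.toNat = 50 := rfl
  have e3 : '3'.toNat = 51 := rfl
  have e4 : '4'.toNat = 52 := rfl
  have e5 : '5'.toNat = 53 := rfl
  have e6 : '6'.toNat = 54 := rfl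
  have e7 : '7'.toNat = 55 := rfl
  have e8 : '8'.toNat = 56 := rfl
  have e9 : '9'.toNat = 57 := rfl
  rw [Bool.eq_iff_iff]
  simp only [e0, e1, e2, e3, e4, e5, e6, e7, e8, e9, Bool.or_eq_true, Bool.and_eq_true, decide_eq_true_eq]
  omega

theorem takeWhile_append_stop {p : Char → Bool} (a : List Char) {b : List Char}
    (hb : b = [] ∨ ∃ c r, b = c :: r ∧ p c = false) :
    (a ++ b).takeWhile p = a.takeWhile p := by
  induction a with
  | nil =>
    rcases hb with h | ⟨c, r, h, hc⟩ <;> simp [h]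
    simp [hc]
  | cons x xs ih =>
    by_cases hx : p x <;> simp [hx, ih]

theorem take_length_takeWhile {p : Char → Bool} (l : List Char) :
    l.take (l.takeWhile p).length = l.takeWhile p := by
  induction l with
  | nil => rfl
  | cons c r ih =>
    by_cases h : p c <;> simp [h, ih]

-- go always returns acc.reverse followed by at least one piece
theorem go_shape (sub : List Char) : ∀ (fuel : Nat) (l cur : List Char) (acc : List (List Char)),
    ∃ ps, ps ≠ [] ∧ PySem.Chars.splitOn.go sub fuel l cur acc = acc.reverse ++ ps := by
  intro fuel
  induction fuel with
  | zero =>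
    intro l cur acc
    exact ⟨[cur.reverse ++ l], by simp, by simp [PySem.Chars.splitOn.go]⟩
  | succ f ih =>
    intro l cur acc
    match l with
    | [] => exact ⟨[cur.reverse], by simp, by simp [PySem.Chars.splitOn.go]⟩
    | c :: rest =>
      by_cases h : sub.isPrefixOf (c :: rest)
      · obtain ⟨ps, hne, hgo⟩ := ih (List.drop sub.length (c :: rest)) [] (cur.reverse :: acc)
        exact ⟨cur.reverse :: ps, by simp, by
          simp only [PySem.Chars.splitOn.go, h, if_true]
          rw [hgo]; simp⟩
      · obtain ⟨ps, hne, hgo⟩ := ih rest (c :: cur) acc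
        exact ⟨ps, hne, by simp only [PySem.Chars.splitOn.go, h]; exact hgo⟩

-- no occurrence: the rest of the string is one final piece
theorem go_no_occ {sub : List Char} (_hsub : sub ≠ []) :
    ∀ (l : List Char) (fuel : Nat) (cur : List Char) (acc : List (List Char)),
    l.length ≤ fuel → ¬ sub <:+: l →
    PySem.Chars.splitOn.go sub fuel l cur acc = acc.reverse ++ [cur.reverse ++ l] := by
  intro l
  induction l with
  | nil =>
    intro fuel cur acc _ _
    match fuel with
    | 0 => simp [PySem.Chars.splitOn.go]
    | f + 1 => simp [PySem.Chars.splitOn.go]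
  | cons c rest ih =>
    intro fuel cur acc hfuel hocc
    match fuel with
    | 0 => simp at hfuel
    | f + 1 =>
      have hnp : sub.isPrefixOf (c :: rest) = false := by
        rw [← Bool.not_eq_true, List.isPrefixOf_iff_prefix]
        exact fun hp => hocc hp.isInfix
      simp only [PySem.Chars.splitOn.go, hnp]
      rw [ih f (c :: cur) acc (by simpa using hfuel) (fun h => hocc (h.trans (List.suffix_cons c rest).isInfix))]
      simp

-- advance to the first occurrence and split there
theorem go_to_occ {sub : List Char} (hsub : sub ≠ []) :
    ∀ (k : Nat) (l : List Char) (fuel : Nat) (cur : List Char) (acc : List (List Char)),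
    l.length ≤ fuel → k ≤ l.length → sub <+: l.drop k → (∀ i < k, ¬ sub <+: l.drop i) →
    PySem.Chars.splitOn.go sub fuel l cur acc
      = PySem.Chars.splitOn.go sub (fuel - (k + 1)) (l.drop (k + sub.length)) []
          ((cur.reverse ++ l.take k) :: acc) := by
  intro k
  induction k with
  | zero =>
    intro l fuel cur acc hfuel _ hpre _
    match l, hpre with
    | c :: rest, hpre =>
      match fuel, hfuel with
      | f + 1, _ =>
        have hp : sub.isPrefixOf (c :: rest) = true := List.isPrefixOf_iff_prefix.mpr hpre
        simp only [PySem.Chars.splitOn.go, hp, if_true]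
        simp
    | [], hpre =>
      exact absurd (List.prefix_nil.mp hpre) hsub
  | succ k ih =>
    intro l fuel cur acc hfuel hk hpre hmin
    match l, hk with
    | c :: rest, hk =>
      match fuel, hfuel with
      | f + 1, hfuel =>
        have hnp : sub.isPrefixOf (c :: rest) = false := by
          rw [← Bool.not_eq_true, List.isPrefixOf_iff_prefix]
          exact hmin 0 (Nat.succ_pos k)
        simp only [PySem.Chars.splitOn.go, hnp]
        rw [ih rest f (c :: cur) acc (by simpa using hfuel) (by simpa using hk)
          (by simpa [Nat.add_comm] using hpre) (fun i hi => by simpa using hmin (i + 1) (by omega))]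
        have hdrop : rest.drop (k + sub.length) = (c :: rest).drop (k + 1 + sub.length) := by
          have : k + 1 + sub.length = (k + sub.length) + 1 := by omega
          simp [this]
        have hfl : f - (k + 1) = f + 1 - (k + 1 + 1) := by omega
        rw [hdrop, ← hfl]
        simp [List.take_succ_cons]

-- index 1 of a list with at least two elements
theorem pyGet?_one {α : Type} (a b : α) (l : List α) :
    PySem.List.pyGet? (a :: b :: l) 1 = some b := by
  rw [show (1 : Int) = ((1 : Nat) : Int) by norm_num, PySem.List.pyGet?_natCast]
  rfl

-- the second element of the split, when 'step=' occurs: its digit prefix is the digit prefix of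
-- everything after the first occurrence (the next occurrence starts with a non-digit)
theorem splitOn_get_one {sub : List Char} (hsub : sub ≠ [])
    (hnd : ∃ c cs, sub = c :: cs ∧ PySem.Chars.isdigit c = false) (s : List Char)
    (hocc : sub <:+: s) :
    ∃ seg, PySem.List.pyGet? (PySem.Chars.splitOn s sub) 1 = some seg ∧
      seg.takeWhile PySem.Chars.isdigit
        = ((s.drop ((PySem.Chars.find s sub).toNat + sub.length)).takeWhile PySem.Chars.isdigit) := by
  have hnn : 0 ≤ PySem.Chars.find s sub := (PySem.Chars.find_nonneg_iff _ _).mpr hocc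
  obtain ⟨hpre, hmin⟩ := PySem.Chars.find_spec (s := s) (sub := sub) hnn
  set k := (PySem.Chars.find s sub).toNat with hkdef
  have hkle : k ≤ s.length := by
    have := PySem.Chars.find_le_length s sub
    omega
  set tail := s.drop (k + sub.length) with htail
  have htlen : tail.length = s.length - (k + sub.length) := by simp [htail]
  have hsplit : PySem.Chars.splitOn s sub
      = PySem.Chars.splitOn.go sub (s.length - k) tail [] [s.take k] := by
    rw [PySem.Chars.splitOn, go_to_occ hsub k s (s.length + 1) [] [] (by omega) hkle hpre hmin]
    have h1 : s.length + 1 - (k + 1) = s.length - k := by omega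
    rw [h1]
    simp [htail]
  by_cases hocc2 : sub <:+: tail
  · have hnn2 : 0 ≤ PySem.Chars.find tail sub := (PySem.Chars.find_nonneg_iff _ _).mpr hocc2
    obtain ⟨hpre2, hmin2⟩ := PySem.Chars.find_spec (s := tail) (sub := sub) hnn2
    set k2 := (PySem.Chars.find tail sub).toNat with hk2def
    have hk2le : k2 ≤ tail.length := by
      have := PySem.Chars.find_le_length tail sub
      omega
    refine ⟨tail.take k2, ?_, ?_⟩
    · rw [hsplit, go_to_occ hsub k2 tail (s.length - k) [] [s.take k] (by omega) hk2le
        hpre2 hmin2]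
      obtain ⟨ps, hpsne, hps⟩ := go_shape sub (s.length - k - (k2 + 1))
        (tail.drop (k2 + sub.length)) [] [([] : List Char).reverse ++ tail.take k2, s.take k]
      rw [hps]
      simp only [List.reverse_cons, List.reverse_nil, List.nil_append]
      match ps, hpsne with
      | p :: ps', _ =>
        exact pyGet?_one _ _ _
    · conv_rhs => rw [← List.take_append_drop k2 tail]
      rw [takeWhile_append_stop]
      right
      obtain ⟨c, cs, hsubeq, hc⟩ := hnd
      obtain ⟨t, ht⟩ := hpre2
      exact ⟨c, cs ++ t, by rw [← ht, hsubeq]; simp, hc⟩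
  · refine ⟨tail, ?_, rfl⟩
    rw [hsplit, go_no_occ hsub tail (s.length - k) [] [s.take k] (by omega) hocc2]
    simp

-- ===== VERDICT (by name: the statement is the Claim_ definition above) =====
theorem extract_step_from_path_spec : Claim_equal_extract_step_from_path := by
  intro path _
  show extract_step_from_path path = extract_step_from_path_alt path
  unfold extract_step_from_path extract_step_from_path_alt pyPartition
  set s := path.toList with hs
  by_cases hin : PySem.Chars.isIn stepEq s = true
  · have hocc : stepEq <:+: s := (PySem.Chars.isIn_iff_infix _ _).mp hin
    have hnn : 0 ≤ PySem.Chars.find s stepEq := (PySem.Chars.find_nonneg_iff _ _).mpr hocc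
    have hlt : ¬ PySem.Chars.find s stepEq < 0 := by omega
    obtain ⟨seg, hget, htw⟩ :=
      splitOn_get_one (by decide) ⟨'s', ['t', 'e', 'p', '='], rfl, by decide⟩ s hocc
    rw [show ['s', 't', 'e', 'p', '='] = stepEq from rfl] at hget htw
    rw [show stepEq.length = 5 from rfl] at htw
    simp only [hin, if_true, hget, hlt, if_false, show stepEq.length = 5 from rfl]
    set k := (PySem.Chars.find s stepEq).toNat with hk
    set tail := s.drop (k + 5) with htl
    have htw' : aCollect seg = tail.takeWhile PySem.Chars.isdigit := by
      rw [aCollect_eq_takeWhile]; exact htw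
    set d := tail.takeWhile PySem.Chars.isdigit with hd
    have hdw : tail.dropWhile (fun c => ['0','1','2','3','4','5','6','7','8','9'].contains c)
        = tail.dropWhile PySem.Chars.isdigit := by
      congr 1
      funext c
      exact contains_digit c
    have hlen : tail.length - (tail.dropWhile PySem.Chars.isdigit).length = d.length := by
      have := List.takeWhile_append_dropWhile (p := PySem.Chars.isdigit) (l := tail)
      have hlen2 : d.length + (tail.dropWhile PySem.Chars.isdigit).length = tail.length := by
        rw [hd, ← List.length_append, this]
      omega
    have hslice : PySem.Chars.slice tail none
        (some ((tail.length - (tail.dropWhile (fun c => ['0','1','2','3','4','5','6','7','8','9'].contains c)).length : Nat) : Int)) = d := by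
      rw [hdw, hlen, PySem.Chars.slice_eq_listSlice, PySem.List.slice_to_natCast, hd,
        take_length_takeWhile]
    simp only [stepEq, List.isEmpty_cons, if_false, Bool.false_eq_true]
    simp only [hslice, htw']
    by_cases hdn : d.isEmpty
    · simp [hdn]
    · simp only [hdn, if_false, Bool.false_eq_true]
      cases h : PySem.Int.ofChars? d <;> simp
  · have hf : PySem.Chars.find s stepEq = -1 :=
      (PySem.Chars.find_eq_neg_one_iff _ _).mpr
        ((PySem.Chars.isIn_eq_false_iff _ _).mp (Bool.not_eq_true _ ▸ Bool.of_not_eq_true hin))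
    simp [hin, hf]
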